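-- pv_equiv track=rewrite | github.com/AvionicsTeam/MAD | xplane2csv/xplane2csv.py | ProcessRange
-- ===== SOURCE A (Python) =====
-- def RemoveMultipleSpaces(s):
--     """Removes multiple spaces from given strings."""
--     if "  " in s:
--         return RemoveMultipleSpaces(s.replace("  ", " "))
--     else:
--         return s
--
-- def PrepareHeader(Header):
--     """ Prepares CSV column names."""
--     Header = Header.strip()
--     PreparedHeader = ["\""+x.replace(",_", "###").replace(" ", "").replace("_", "").replace("###", "_").replace(",", "_").replace("/", "_").replace("|", "")+"\"" for x in Header.split(" | ")]
--     for i,x in enumerate(PreparedHeader):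
--         if PreparedHeader.count(x)>1:
--             PreparedHeader[i] = PreparedHeader[i] + "_X"
--
--     return PreparedHeader
--
-- def ProcessRange(CurrentRange):
--     """ Processes raw data range."""
--     Header = PrepareHeader(CurrentRange[0])
--     Data = CurrentRange[1:]
--
--     Columns = {}
--     for col in Header:
--         Columns[col] = []
--
--     for i,x in enumerate(Data):
--         row = RemoveMultipleSpaces(x)[:-3].split(" | ")
--         for num,cell in enumerate(row):
--             Columns[Header[num]].append(cell)
--
--     return Columns
-- ===== SOURCE B (Python) =====
-- def PrepareHeader(Header):
--     """ Prepares CSV column names."""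
--     Header = Header.strip()
--     PreparedHeader = ["\""+x.replace(",_", "###").replace(" ", "").replace("_", "").replace("###", "_").replace(",", "_").replace("/", "_").replace("|", "")+"\"" for x in Header.split(" | ")]
--     for i, x in enumerate(PreparedHeader):
--         if PreparedHeader.count(x) > 1:
--             PreparedHeader[i] = PreparedHeader[i] + "_X"
--     return PreparedHeader
--
-- def _collapse(s):
--     """Iterative multiple-space removal (while loop instead of recursion)."""
--     while "  " in s:
--         s = s.replace("  ", " ")
--     return s
--
-- def ProcessRange(CurrentRange):
--     """ Processes raw data range: transpose the parsed rows into columns."""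
--     header = PrepareHeader(CurrentRange[0])
--     rows = [_collapse(x)[:-3].split(" | ") for x in CurrentRange[1:]]
--     return {name: [r[j] for r in rows if j < len(r)] for j, name in enumerate(header)}
-- ===== Notes on version B (the rewrite author's own statement) =====
-- stated objective: simpler
-- what changed: B replaces A's row-by-row dict mutation (per-cell appends into pre-initialised dict entries) with a transpose: it parses all rows first, then builds each column in one dict comprehension by gathering the j-th cell of every long-enough row; the recursive space-collapse helper becomes an iterative while loop. Pre_ excludes inputs where A raises (empty list; a data row with more cells than the header) and inputs whose prepared header still contains duplicate names, on which A's interleaving of several columns into one dict entry is an accident of dict key collision.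
import Mathlib
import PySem

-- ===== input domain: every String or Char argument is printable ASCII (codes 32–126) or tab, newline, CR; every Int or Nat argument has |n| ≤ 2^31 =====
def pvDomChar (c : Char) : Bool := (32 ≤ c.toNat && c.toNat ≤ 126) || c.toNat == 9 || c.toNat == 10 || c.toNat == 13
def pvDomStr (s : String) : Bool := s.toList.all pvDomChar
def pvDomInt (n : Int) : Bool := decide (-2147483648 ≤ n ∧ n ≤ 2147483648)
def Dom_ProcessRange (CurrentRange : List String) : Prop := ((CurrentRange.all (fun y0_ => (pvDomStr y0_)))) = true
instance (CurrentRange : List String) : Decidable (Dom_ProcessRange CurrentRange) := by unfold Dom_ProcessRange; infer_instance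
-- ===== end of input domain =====

-- B replaces A's row-by-row dict mutation with a parse-then-transpose dict comprehension;
-- the recursive space-collapse helper becomes an iterative while loop.  Objective: simpler.

-- ===== shared helpers (identical Python code in A and B: PrepareHeader; the space collapse
-- is A's recursion = B's while loop, both are this tail recursion, made total by a fuel
-- guard = the string length, which bounds the number of iterations since every pass
-- shortens the string) =====

-- RemoveMultipleSpaces (A, recursive) / _collapse (B, while loop)
def pvCollapse : Nat → String → String
  | 0, s => s
  | (n+1), s =>
      if PySem.Str.isIn "  " s then pvCollapse n (PySem.Str.replace s "  " " ") else s

-- the per-name transform inside PrepareHeader's list comprehension ('"' + x.replace(...)... + '"')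
def pvTransform (x : String) : String :=
  PySem.Str.join "" ["\"",
    PySem.Str.replace (PySem.Str.replace (PySem.Str.replace (PySem.Str.replace
      (PySem.Str.replace (PySem.Str.replace (PySem.Str.replace x ",_" "###")
        " " "") "_" "") "###" "_") "," "_") "/" "_") "|" "",
    "\""]

-- PrepareHeader (identical in A and B)
def pvPrepareHeader (Header : String) : List String :=
  let Header := PySem.Str.strip Header
  let ph := ((PySem.Str.split? Header " | ").getD []).map pvTransform
  (List.range ph.length).foldl (fun L i =>
    let x := L.getD i ""
    if 1 < L.count x then L.set i (PySem.Str.join "" [x, "_X"]) else L) ph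

-- RemoveMultipleSpaces(x)[:-3].split(" | ")  (A's row parse = B's _collapse(x)[:-3].split(" | "))
def pvRowCells (x : String) : List String :=
  (PySem.Str.split? (PySem.Str.slice (pvCollapse (PySem.Str.len x).toNat x) none (some (-3))) " | ").getD []

-- closed-form description of the collapsed string, used by Pre_ below: one left-to-right
-- pass that drops a space directly followed by another space (proved equal to the iterated
-- replace of the ports in pvCollapse_toList below)
def pvSquash : List Char → List Char
  | [] => []
  | [c] => [c]
  | c1 :: c2 :: r => if c1 = ' ' ∧ c2 = ' ' then pvSquash (c2 :: r) else c1 :: pvSquash (c2 :: r)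

-- the cells of one data row, phrased via pvSquash (no iteration): used by Pre_
def pvSpecRowCells (x : String) : List String :=
  (PySem.Str.split? (PySem.Str.slice (String.ofList (pvSquash x.toList)) none (some (-3))) " | ").getD []

-- ===== PORT A =====
def ProcessRange (CurrentRange : List String) : List (String × List String) :=
  let Header := pvPrepareHeader (PySem.List.pyGetD CurrentRange 0 "")
  let Data := PySem.List.slice CurrentRange (some 1) none
  let Columns : PySem.Dict String (List String) :=
    Header.foldl (fun d col => d.insert col []) PySem.Dict.empty
  let Columns := (PySem.List.enumerate Data 0).foldl (fun d p =>
    let row := pvRowCells p.2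
    (PySem.List.enumerate row 0).foldl
      (fun d q => d.modify (PySem.List.pyGetD Header q.1 "") [] (fun l => l ++ [q.2])) d) Columns
  Columns.items

-- ===== PORT B =====
def ProcessRange_alt (CurrentRange : List String) : List (String × List String) :=
  let header := pvPrepareHeader (PySem.List.pyGetD CurrentRange 0 "")
  let rows := (PySem.List.slice CurrentRange (some 1) none).map pvRowCells
  ((PySem.List.enumerate header 0).foldl
    (fun d p => d.insert p.2
      ((rows.filter (fun r => decide (p.1 < PySem.List.len r))).map
        (fun r => PySem.List.pyGetD r p.1 "")))
    (PySem.Dict.empty : PySem.Dict String (List String))).items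

-- ===== PRECONDITION & SPEC =====
-- Pre_ excludes (a) inputs where A raises: the empty list (IndexError on CurrentRange[0]) and
-- inputs with a data row holding more cells than the header (IndexError on Header[num]); and
-- (b) inputs whose prepared header still contains duplicate names (e.g. three identical columns),
-- where A's per-cell interleaving into one shared dict entry is an accident of dict key collision
-- and B's dict comprehension keeps only the last column of that name.
def Pre_ProcessRange (CurrentRange : List String) : Prop :=
  CurrentRange ≠ [] ∧
  (pvPrepareHeader (CurrentRange.getD 0 "")).Nodup ∧
  ∀ s ∈ CurrentRange.tail,
    (pvSpecRowCells s).length ≤ (pvPrepareHeader (CurrentRange.getD 0 "")).length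
instance (CurrentRange : List String) : Decidable (Pre_ProcessRange CurrentRange) := by
  unfold Pre_ProcessRange; infer_instance

def pvWitness_ProcessRange : List String := ["A | B xxx", "1 | 2xxx"]

def Spec_ProcessRange (CurrentRange : List String) (out : List (String × List String)) : Prop := out = ProcessRange_alt CurrentRange
instance (CurrentRange : List String) (out : List (String × List String)) : Decidable (Spec_ProcessRange CurrentRange out) := by unfold Spec_ProcessRange; infer_instance

-- ===== CLAIM (what is proved, stated in full; the proofs are below) =====
def Claim_equal_ProcessRange : Prop := ∀ (CurrentRange : List String), Dom_ProcessRange CurrentRange → Pre_ProcessRange CurrentRange → Spec_ProcessRange CurrentRange (ProcessRange CurrentRange)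

-- ===== LEMMAS AND PROOFS =====

def pvRep : List Char → List Char
  | [] => []
  | c :: t => if [' ', ' '].isPrefixOf (c :: t) then ' ' :: pvRep (t.drop 1) else c :: pvRep t
termination_by l => l.length
decreasing_by all_goals (simp; try omega)

theorem pvGo_eq : ∀ (fuel : Nat) (l acc : List Char), l.length ≤ fuel →
    PySem.Chars.replace.go [' ', ' '] [' '] fuel l acc = acc.reverse ++ pvRep l := by
  intro fuel
  induction fuel with
  | zero =>
    intro l acc hl
    have : l = [] := List.eq_nil_of_length_eq_zero (by omega)
    subst this
    simp [PySem.Chars.replace.go, pvRep]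
  | succ n ih =>
    intro l acc hl
    cases l with
    | nil => simp [PySem.Chars.replace.go, pvRep]
    | cons c t =>
      rw [PySem.Chars.replace.go]
      by_cases hp : [' ', ' '].isPrefixOf (c :: t) = true
      · rw [if_pos hp]
        have hlen : (List.drop [' ', ' '].length (c :: t)).length ≤ n := by
          simp only [List.length_drop, List.length_cons] at *; omega
        rw [ih _ _ hlen]
        rw [pvRep, if_pos hp]
        simp
      · rw [if_neg hp]
        have hlen : t.length ≤ n := by simp at hl; omega
        rw [ih _ _ hlen]
        rw [pvRep, if_neg hp]
        simp

theorem pvReplace_eq_rep (cs : List Char) :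
    PySem.Chars.replace cs [' ', ' '] [' '] = pvRep cs := by
  rw [PySem.Chars.replace]
  rw [if_neg (by simp)]
  rw [pvGo_eq cs.length cs [] (le_refl _)]
  simp

theorem pvRep_length_le : ∀ (l : List Char), (pvRep l).length ≤ l.length := by
  intro l
  induction l using pvRep.induct with
  | case1 => simp [pvRep]
  | case2 c t hp ih =>
    rw [pvRep, if_pos hp]
    simp only [List.length_cons]
    have : (t.drop 1).length ≤ t.length := by simp
    omega
  | case3 c t hp ih =>
    rw [pvRep, if_neg hp]
    simp only [List.length_cons]
    omega

theorem pvRep_length_lt : ∀ (l : List Char), [' ', ' '] <:+: l → (pvRep l).length < l.length := by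
  intro l
  induction l using pvRep.induct with
  | case1 => intro h; simp at h
  | case2 c t hp ih =>
    intro _
    rw [pvRep, if_pos hp]
    have ht : t ≠ [] := by
      intro h; subst h; simp [List.isPrefixOf] at hp
    have : (t.drop 1).length = t.length - 1 := by simp
    have h2 := pvRep_length_le (t.drop 1)
    have ht1 : 0 < t.length := List.length_pos_iff.mpr ht
    simp only [List.length_cons]
    omega
  | case3 c t hp ih =>
    intro hin
    rw [pvRep, if_neg hp]
    have hin' : [' ', ' '] <:+: t := by
      rcases (List.infix_cons_iff).mp hin with h | h
      · exact absurd (List.isPrefixOf_iff_prefix.mpr h) hp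
      · exact h
    have := ih hin'
    simp only [List.length_cons]
    omega

theorem pvHead?_rep : ∀ (l : List Char), (pvRep l).head? = l.head? := by
  intro l
  induction l using pvRep.induct with
  | case1 => simp [pvRep]
  | case2 c t hp ih =>
    rw [pvRep, if_pos hp]
    have hc : c = ' ' := by
      cases t with
      | nil => simp [List.isPrefixOf] at hp
      | cons b r => simp [List.isPrefixOf] at hp; exact hp.1.symm
    simp [hc]
  | case3 c t hp ih => rw [pvRep, if_neg hp]; rfl

theorem pvSquash_cons (c : Char) (a : List Char) :
    pvSquash (c :: a) = if c = ' ' ∧ a.head? = some ' ' then pvSquash a else c :: pvSquash a := by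
  cases a with
  | nil => simp [pvSquash]
  | cons b r =>
    rw [pvSquash]
    simp only [List.head?_cons, Option.some.injEq]

theorem pvSquash_rep : ∀ (l : List Char), pvSquash (pvRep l) = pvSquash l := by
  intro l
  induction l using pvRep.induct with
  | case1 => simp [pvRep]
  | case2 c t hp ih =>
    rw [pvRep, if_pos hp]
    cases t with
    | nil => simp [List.isPrefixOf] at hp
    | cons b r =>
      have hc : c = ' ' := by simp [List.isPrefixOf] at hp; exact hp.1.symm
      have hb : b = ' ' := by simp [List.isPrefixOf] at hp; exact hp.2.symm
      subst hc hb
      simp only [List.drop_one, List.tail_cons] at ih ⊢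
      conv_lhs => rw [pvSquash_cons]
      rw [pvHead?_rep, ih]
      conv_lhs => rw [← pvSquash_cons]
      rw [show pvSquash (' ' :: ' ' :: r) = pvSquash (' ' :: r) from by
        rw [pvSquash]; simp]
  | case3 c t hp ih =>
    rw [pvRep, if_neg hp]
    rw [pvSquash_cons, pvSquash_cons, pvHead?_rep, ih]

theorem pvSquash_of_no_double : ∀ (l : List Char), ¬ ([' ', ' '] <:+: l) → pvSquash l = l := by
  intro l
  induction l with
  | nil => intro _; rfl
  | cons c t ih =>
    intro h
    have ht : ¬ ([' ', ' '] <:+: t) := fun hh => h (hh.trans (List.suffix_cons c t).isInfix)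
    rw [pvSquash_cons]
    have hcd : ¬ (c = ' ' ∧ t.head? = some ' ') := by
      rintro ⟨rfl, hh⟩
      cases t with
      | nil => simp at hh
      | cons b r =>
        simp only [List.head?_cons, Option.some.injEq] at hh
        subst hh
        exact h (List.IsPrefix.isInfix ⟨r, rfl⟩)
    rw [if_neg hcd, ih ht]

theorem pvCollapse_toList : ∀ (n : Nat) (s : String), s.toList.length ≤ n →
    (pvCollapse n s).toList = pvSquash s.toList := by
  intro n
  induction n with
  | zero =>
    intro s h
    have hnil : s.toList = [] := List.eq_nil_of_length_eq_zero (by omega)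
    rw [pvCollapse, hnil]
    rfl
  | succ n ih =>
    intro s h
    rw [pvCollapse]
    by_cases hin : PySem.Str.isIn "  " s = true
    · rw [if_pos hin]
      have hin' : PySem.Chars.isIn [' ', ' '] s.toList = true := hin
      have hinf : [' ', ' '] <:+: s.toList := (PySem.Chars.isIn_iff_infix _ _).mp hin'
      have hrep : (PySem.Str.replace s "  " " ").toList = pvRep s.toList := by
        show (String.ofList (PySem.Chars.replace s.toList [' ', ' '] [' '])).toList = _
        rw [String.toList_ofList, pvReplace_eq_rep]
      have hlt := pvRep_length_lt s.toList hinf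
      rw [ih _ (by rw [hrep]; omega), hrep, pvSquash_rep]
    · rw [if_neg hin]
      have hni : ¬ ([' ', ' '] <:+: s.toList) := fun hh =>
        hin ((PySem.Chars.isIn_iff_infix _ _).mpr hh)
      rw [pvSquash_of_no_double _ hni]

theorem pvRowCells_eq (x : String) : pvRowCells x = pvSpecRowCells x := by
  unfold pvRowCells pvSpecRowCells
  have h : pvCollapse (PySem.Str.len x).toNat x = String.ofList (pvSquash x.toList) := by
    have ht : (pvCollapse (PySem.Str.len x).toNat x).toList = pvSquash x.toList := by
      apply pvCollapse_toList
      simp [PySem.Str.len]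
    rw [← ht, String.ofList_toList]
  rw [h]


-- proof-side helper: the value rows of the dict as a plain list, one per header entry;
-- pvUpd appends row's cells at positions s, s+1, …
def pvUpd (v : List (List String)) (row : List String) (s : Nat) : List (List String) :=
  v.mapIdx (fun j l => l ++ if s ≤ j ∧ j < s + row.length then [row.getD (j - s) ""] else [])

theorem length_pvUpd (v : List (List String)) (row : List String) (s : Nat) :
    (pvUpd v row s).length = v.length := by
  simp [pvUpd]

theorem getElem_pvUpd (v : List (List String)) (row : List String) (s j : Nat)
    (h : j < (pvUpd v row s).length) :
    (pvUpd v row s)[j] =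
      v[j]'(by simpa [length_pvUpd] using h) ++
        if s ≤ j ∧ j < s + row.length then [row.getD (j - s) ""] else [] := by
  simp [pvUpd]

theorem pvUpd_nil (v : List (List String)) (s : Nat) : pvUpd v [] s = v := by
  apply List.ext_getElem
  · simp [length_pvUpd]
  · intro j h1 h2
    rw [getElem_pvUpd]
    simp

theorem pvUpd_cons (v : List (List String)) (c : String) (row : List String) (s : Nat)
    (hs : s < v.length) :
    pvUpd v (c :: row) s = pvUpd (v.set s (v[s] ++ [c])) row (s + 1) := by
  apply List.ext_getElem
  · simp [length_pvUpd]
  · intro j h1 h2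
    rw [getElem_pvUpd, getElem_pvUpd, List.getElem_set]
    by_cases heq : s = j
    · rw [if_pos (show s ≤ j ∧ j < s + (c :: row).length by
            simp only [List.length_cons]; omega),
          if_pos heq, if_neg (by omega)]
      subst heq
      simp
    · by_cases hgt : s + 1 ≤ j ∧ j < s + 1 + row.length
      · rw [if_pos (show s ≤ j ∧ j < s + (c :: row).length by
              simp only [List.length_cons]; omega),
            if_neg heq, if_pos hgt]
        have hj : j - s = (j - (s + 1)) + 1 := by omega
        rw [hj]
        simp
      · rw [if_neg (show ¬ (s ≤ j ∧ j < s + (c :: row).length) by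
              simp only [List.length_cons]; omega),
            if_neg heq, if_neg hgt]

theorem pvKeys_zip (H : List String) (v : List (List String)) (hv : v.length = H.length) :
    (PySem.Dict.mk (H.zip v)).keys = H := by
  simp only [PySem.Dict.keys]
  exact List.map_fst_zip (by omega)

theorem pvGetD_zip (H : List String) (v : List (List String)) (hnd : H.Nodup)
    (hv : v.length = H.length) (s : Nat) (hs : s < H.length) :
    (PySem.Dict.mk (H.zip v)).getD (H[s]) [] = v[s]'(by omega) := by
  apply PySem.Dict.getD_of_mem_items
  · have hmem : (H.zip v)[s]'(by simp [List.length_zip]; omega) ∈ H.zip v :=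
      List.getElem_mem _
    rwa [List.getElem_zip] at hmem
  · rw [pvKeys_zip H v hv]; exact hnd

theorem pvInsert_zip (H : List String) (v : List (List String)) (hnd : H.Nodup)
    (hv : v.length = H.length) (s : Nat) (hs : s < H.length) (w : List String) :
    (PySem.Dict.mk (H.zip v)).insert (H[s]) w = PySem.Dict.mk (H.zip (v.set s w)) := by
  have hc : (PySem.Dict.mk (H.zip v)).contains (H[s]) = true := by
    rw [PySem.Dict.contains_iff_mem_keys, pvKeys_zip H v hv]
    exact List.getElem_mem _
  apply PySem.Dict.ext
  simp only [PySem.Dict.insert, hc, if_pos]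
  apply List.ext_getElem
  · simp [List.length_zip, List.length_map, List.length_set]
  · intro j hj1 hj2
    rw [List.getElem_map, List.getElem_zip, List.getElem_zip, List.getElem_set]
    have hjH : j < H.length := by
      simp [List.length_zip] at hj2; omega
    by_cases hej : H[j]'hjH = H[s]
    · have : j = s := (List.Nodup.getElem_inj_iff hnd).mp hej
      subst this
      simp [hej]
    · have : (H[j]'hjH == H[s]) = false := by
        simpa using hej
      simp only [this]
      have : ¬ s = j := by
        intro h; subst h; exact hej rfl
      simp [this]

theorem pvRowStep (H : List String) (hnd : H.Nodup) :
    ∀ (row : List String) (s : Nat) (v : List (List String)), v.length = H.length →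
      s + row.length ≤ H.length →
      (PySem.List.enumerate row (s : Int)).foldl
        (fun d q => d.modify (PySem.List.pyGetD H q.1 "") [] (fun l => l ++ [q.2]))
        (PySem.Dict.mk (H.zip v))
      = PySem.Dict.mk (H.zip (pvUpd v row s)) := by
  intro row
  induction row with
  | nil =>
    intro s v hv hb
    simp [PySem.List.enumerate_nil, pvUpd_nil]
  | cons c row ih =>
    intro s v hv hb
    have hs : s < H.length := by simp only [List.length_cons] at hb; omega
    have hkey : PySem.List.pyGetD H ((s : Int)) "" = H[s] := by
      rw [PySem.List.pyGetD_natCast, List.getD_eq_getElem _ _ hs]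
    rw [PySem.List.enumerate_cons]
    simp only [List.foldl_cons]
    have hstep : (PySem.Dict.mk (H.zip v)).modify (PySem.List.pyGetD H (s : Int) "") []
          (fun l => l ++ [c]) = PySem.Dict.mk (H.zip (v.set s (v[s]'(by omega) ++ [c]))) := by
      simp only [PySem.Dict.modify]
      rw [hkey, pvGetD_zip H v hnd hv s hs, pvInsert_zip H v hnd hv s hs]
    rw [hstep]
    rw [show (s : Int) + 1 = ((s + 1 : Nat) : Int) by push_cast; ring]
    rw [ih (s + 1) (v.set s (v[s]'(by omega) ++ [c]))
          (by rw [List.length_set]; exact hv)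
          (by simp only [List.length_cons] at hb; omega)]
    rw [pvUpd_cons v c row s (by omega)]

theorem pvRowsStep (H : List String) (hnd : H.Nodup) :
    ∀ (R : List (List String)) (v : List (List String)), v.length = H.length →
      (∀ r ∈ R, r.length ≤ H.length) →
      R.foldl (fun d row =>
          (PySem.List.enumerate row 0).foldl
            (fun d q => d.modify (PySem.List.pyGetD H q.1 "") [] (fun l => l ++ [q.2])) d)
        (PySem.Dict.mk (H.zip v))
      = PySem.Dict.mk (H.zip (R.foldl (fun v row => pvUpd v row 0) v)) := by
  intro R
  induction R with
  | nil => intro v hv _; simp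
  | cons r R ih =>
    intro v hv hr
    rw [List.foldl_cons, List.foldl_cons]
    rw [show (0 : Int) = ((0 : Nat) : Int) by norm_num]
    rw [pvRowStep H hnd r 0 v hv (by simpa using hr r (by simp))]
    exact ih (pvUpd v r 0) (by rw [length_pvUpd]; exact hv)
      (fun x hx => hr x (by simp [hx]))

theorem length_foldl_pvUpd :
    ∀ (R : List (List String)) (v : List (List String)),
      (R.foldl (fun v row => pvUpd v row 0) v).length = v.length := by
  intro R
  induction R with
  | nil => intro v; rfl
  | cons r R ih => intro v; rw [List.foldl_cons, ih, length_pvUpd]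

theorem getElem_foldl_pvUpd :
    ∀ (R : List (List String)) (v : List (List String)) (j : Nat) (hj : j < v.length),
      (R.foldl (fun v row => pvUpd v row 0) v)[j]'(by rw [length_foldl_pvUpd]; exact hj)
        = v[j] ++ (R.filter (fun r => decide (j < r.length))).map (fun r => r.getD j "") := by
  intro R
  induction R with
  | nil => intro v j hj; simp
  | cons r R ih =>
    intro v j hj
    simp only [List.foldl_cons]
    rw [ih (pvUpd v r 0) j (by rw [length_pvUpd]; exact hj)]
    rw [getElem_pvUpd v r 0 j (by rw [length_pvUpd]; exact hj)]
    rw [List.filter_cons]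
    by_cases h : j < r.length
    · rw [if_pos (by omega), if_pos (by simpa using h)]
      simp
    · rw [if_neg (by omega), if_neg (by simpa using h)]
      simp

theorem pvMapPair (H : List String) :
    H.map (fun h => (h, ([] : List String))) = H.zip (List.replicate H.length []) := by
  induction H with
  | nil => rfl
  | cons h t ih => simp [List.replicate_succ, ih]

theorem pvInit (H : List String) (hnd : H.Nodup) :
    H.foldl (fun d col => d.insert col ([] : List String)) PySem.Dict.empty
      = PySem.Dict.mk (H.zip (List.replicate H.length [])) := by
  apply PySem.Dict.ext
  rw [PySem.Dict.items_foldl_insert_fresh H (fun c => c) (fun _ => ([] : List String))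
        PySem.Dict.empty (by intro a _; rfl) (by simpa using hnd)]
  simpa using pvMapPair H

theorem pvAFold (H : List String) :
    ∀ (Data : List String) (s : Int) (init : PySem.Dict String (List String)),
      (PySem.List.enumerate Data s).foldl (fun d p =>
          (PySem.List.enumerate (pvRowCells p.2) 0).foldl
            (fun d q => d.modify (PySem.List.pyGetD H q.1 "") [] (fun l => l ++ [q.2])) d) init
      = (Data.map pvRowCells).foldl (fun d row =>
          (PySem.List.enumerate row 0).foldl
            (fun d q => d.modify (PySem.List.pyGetD H q.1 "") [] (fun l => l ++ [q.2])) d) init := by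
  intro Data
  induction Data with
  | nil => intro s init; simp [PySem.List.enumerate_nil]
  | cons x t ih =>
    intro s init
    rw [PySem.List.enumerate_cons, List.map_cons, List.foldl_cons, List.foldl_cons]
    exact ih (s + 1) _

theorem pvMain (H : List String) (hnd : H.Nodup) (R : List (List String)) :
    (PySem.Dict.mk (H.zip (R.foldl (fun v row => pvUpd v row 0)
        (List.replicate H.length ([] : List String))))).items
      = ((PySem.List.enumerate H 0).foldl
          (fun d p => d.insert p.2
            ((R.filter (fun r => decide (p.1 < PySem.List.len r))).map
              (fun r => PySem.List.pyGetD r p.1 "")))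
          (PySem.Dict.empty : PySem.Dict String (List String))).items := by
  rw [PySem.Dict.items_foldl_insert_fresh (PySem.List.enumerate H 0)
        (fun p => p.2)
        (fun p => (R.filter (fun r => decide (p.1 < PySem.List.len r))).map
              (fun r => PySem.List.pyGetD r p.1 ""))
        PySem.Dict.empty
        (by intro a _; rfl)
        (by rw [PySem.List.map_snd_enumerate]; exact hnd)]
  show H.zip _ = [] ++ (PySem.List.enumerate H 0).map _
  rw [List.nil_append]
  apply List.ext_getElem
  · rw [List.length_zip, length_foldl_pvUpd, List.length_replicate, List.length_map,
        PySem.List.length_enumerate]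
    omega
  · intro j hj1 hj2
    have hjH : j < H.length := by
      rw [List.length_map, PySem.List.length_enumerate] at hj2
      exact hj2
    rw [List.getElem_zip, List.getElem_map,
        PySem.List.getElem_enumerate H 0 j (by rw [PySem.List.length_enumerate]; exact hjH)]
    have hVj : (R.foldl (fun v row => pvUpd v row 0)
          (List.replicate H.length ([] : List String)))[j]'(by
            rw [length_foldl_pvUpd, List.length_replicate]; exact hjH) =
        (R.filter (fun r => decide (j < r.length))).map (fun r => r.getD j "") := by
      rw [getElem_foldl_pvUpd R _ j (by rw [List.length_replicate]; exact hjH)]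
      simp
    rw [hVj]
    simp [PySem.List.len_eq]

-- ===== VERDICT (by name: the statement is the Claim_ definition above) =====
theorem ProcessRange_spec : Claim_equal_ProcessRange := by
  intro CurrentRange _ hpre
  obtain ⟨hne, hnd, hrows⟩ := hpre
  unfold Spec_ProcessRange
  simp only [ProcessRange, ProcessRange_alt, PySem.List.pyGetD_zero, PySem.List.slice_from_one]
  have hRlen : ∀ r ∈ CurrentRange.tail.map pvRowCells,
      r.length ≤ (pvPrepareHeader (CurrentRange.getD 0 "")).length := by
    intro r hr
    obtain ⟨x, hx, rfl⟩ := List.mem_map.mp hr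
    rw [pvRowCells_eq]
    exact hrows x hx
  rw [pvInit _ hnd, pvAFold _ CurrentRange.tail 0 _,
      pvRowsStep _ hnd (CurrentRange.tail.map pvRowCells) _ (by simp) hRlen,
      pvMain _ hnd (CurrentRange.tail.map pvRowCells)]
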